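-- pv_equiv track=rewrite | github.com/etalab/csv_detective_api | service/utils/reference_matcher.py | get_reference_dataset
-- ===== SOURCE A (Python) =====
-- from collections import defaultdict
--
-- MATCH_DICT = {
--     "adresse": [0],
--     "code_commune_insee": [0],
--     "code_departement": [0],
--     "code_postal": [0],
--     "code_region": [0],
--     "commune": [0],
--     "siren": [1, 2],
--     "siret": [1, 2]
-- }
--
-- def get_reference_dataset(column_types):
--     reference_datasets = defaultdict(list)
--     for tipo in column_types:
--         if tipo not in MATCH_DICT:
--             continue
--         ref_ds_id = MATCH_DICT[tipo]
--         for id in ref_ds_id: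
--             reference_datasets[id].append(tipo)
--     return reference_datasets
-- ===== SOURCE B (Python) =====
-- from collections import defaultdict
--
-- MATCH_DICT = {
--     "adresse": [0],
--     "code_commune_insee": [0],
--     "code_departement": [0],
--     "code_postal": [0],
--     "code_region": [0],
--     "commune": [0],
--     "siren": [1, 2],
--     "siret": [1, 2]
-- }
--
-- def get_reference_dataset(column_types):
--     # flatten to (dataset id, type) pairs, then build each id's list by one filter pass
--     pairs = [(i, t) for t in column_types if t in MATCH_DICT for i in MATCH_DICT[t]]
--     reference_datasets = defaultdict(list)
--     for i in dict.fromkeys(i for i, _ in pairs):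
--         reference_datasets[i] = [t for j, t in pairs if j == i]
--     return reference_datasets
-- ===== Notes on version B (the rewrite author's own statement) =====
-- stated objective: alternative
-- what changed: Replaces the single forward pass that appends into a defaultdict with a flatten-then-group scheme: flatten column_types to (id, type) pairs, dedup the ids in first-occurrence order, and build each id's list by one filter over the pairs.
import Mathlib
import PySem

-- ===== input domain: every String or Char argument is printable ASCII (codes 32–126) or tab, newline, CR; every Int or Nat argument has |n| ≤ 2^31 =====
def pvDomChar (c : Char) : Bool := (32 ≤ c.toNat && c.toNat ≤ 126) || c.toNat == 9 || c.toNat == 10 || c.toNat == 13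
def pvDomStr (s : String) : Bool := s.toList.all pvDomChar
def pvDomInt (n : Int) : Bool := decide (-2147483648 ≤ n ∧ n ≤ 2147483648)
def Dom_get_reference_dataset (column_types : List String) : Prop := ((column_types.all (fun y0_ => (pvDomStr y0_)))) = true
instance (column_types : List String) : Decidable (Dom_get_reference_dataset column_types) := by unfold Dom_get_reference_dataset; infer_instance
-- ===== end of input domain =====

-- B groups by flattening to (id, type) pairs, deduping the ids in first-occurrence
-- order and filtering the pairs per id, instead of A's single append-into-defaultdict pass.

def MATCH_DICT : PySem.Dict String (List Int) := PySem.Dict.ofList [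
  ("adresse", [0]),
  ("code_commune_insee", [0]),
  ("code_departement", [0]),
  ("code_postal", [0]),
  ("code_region", [0]),
  ("commune", [0]),
  ("siren", [1, 2]),
  ("siret", [1, 2])]

-- ===== PORT A =====
def get_reference_dataset (column_types : List String) : List (Int × List String) :=
  (column_types.foldl (fun d tipo =>
      match MATCH_DICT.get? tipo with
      | none => d                       -- continue
      | some ref_ds_id =>
          ref_ds_id.foldl (fun d id => d.modify id [] (fun v => v ++ [tipo])) d)
    PySem.Dict.empty).items

-- ===== PORT B =====
def get_reference_dataset_alt (column_types : List String) : List (Int × List String) :=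
  let pairs := column_types.flatMap (fun t =>
    match MATCH_DICT.get? t with
    | none => []
    | some ids => ids.map (fun i => (i, t)))
  let seen := PySem.Set.ofList (pairs.map Prod.fst)   -- dict.fromkeys: ids, first-occurrence order
  (seen.foldl (fun d i =>
      d.insert i ((pairs.filter (fun p => p.1 == i)).map Prod.snd))
    PySem.Dict.empty).items

-- ===== PRECONDITION & SPEC =====
def Spec_get_reference_dataset (column_types : List String) (out : List (Int × List String)) : Prop := out = get_reference_dataset_alt column_types
instance (column_types : List String) (out : List (Int × List String)) : Decidable (Spec_get_reference_dataset column_types out) := by unfold Spec_get_reference_dataset; infer_instance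

-- ===== CLAIM (what is proved, stated in full; the proofs are below) =====
def Claim_equal_get_reference_dataset : Prop := ∀ (column_types : List String), Dom_get_reference_dataset column_types → Spec_get_reference_dataset column_types (get_reference_dataset column_types)

-- ===== LEMMAS AND PROOFS =====

-- the (id, type) pair stream of B
def pvPairs (column_types : List String) : List (Int × String) :=
  column_types.flatMap (fun t =>
    match MATCH_DICT.get? t with
    | none => []
    | some ids => ids.map (fun i => (i, t)))

-- A's nested loops are the grouping fold over the flattened pair stream
theorem pvA_eq_foldl_pairs (column_types : List String) (d : PySem.Dict Int (List String)) :
    column_types.foldl (fun d tipo =>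
      match MATCH_DICT.get? tipo with
      | none => d
      | some ref_ds_id =>
          ref_ds_id.foldl (fun d id => d.modify id [] (fun v => v ++ [tipo])) d) d
    = (pvPairs column_types).foldl (fun d p => d.modify p.1 [] (fun v => v ++ [p.2])) d := by
  induction column_types generalizing d with
  | nil => rfl
  | cons t rest ih =>
      simp only [List.foldl_cons, pvPairs, List.flatMap_cons, List.foldl_append]
      cases h : MATCH_DICT.get? t with
      | none => simpa [pvPairs] using ih d
      | some ids => simp [pvPairs, List.foldl_map, ih]

theorem get_reference_dataset_spec : Claim_equal_get_reference_dataset := by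
  intro column_types _
  unfold Spec_get_reference_dataset get_reference_dataset get_reference_dataset_alt
  rw [pvA_eq_foldl_pairs]
  set P := pvPairs column_types with hP
  have hstep : (fun (d : PySem.Dict Int (List String)) (p : Int × String) =>
      d.modify p.1 [] (fun v => v ++ [p.2]))
      = fun d p => d.modify (Prod.fst p) [] ((fun (_ : PySem.Dict Int (List String)) (p : Int × String) (v : List String) => v ++ [p.2]) d p) := rfl
  have hnodupA : (P.foldl (fun d p => d.modify p.1 [] (fun v => v ++ [p.2])) PySem.Dict.empty).keys.Nodup := by
    rw [hstep]
    exact PySem.Dict.nodup_keys_foldl_modify_key P Prod.fst [] _ PySem.Dict.empty (by simp [PySem.Dict.keys_empty])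
  have hkeysA : (P.foldl (fun d p => d.modify p.1 [] (fun v => v ++ [p.2])) PySem.Dict.empty).keys
      = PySem.Set.ofList (P.map Prod.fst) := by
    rw [hstep, PySem.Dict.keys_foldl_modify_key]
    simp [PySem.Dict.keys_empty, PySem.Set.update_nil_left]
  -- LHS items: keys in first-occurrence order, each with its filtered list
  have hA : (P.foldl (fun d p => d.modify p.1 [] (fun v => v ++ [p.2])) PySem.Dict.empty).items
      = (PySem.Set.ofList (P.map Prod.fst)).map
          (fun k => (k, (P.filter (fun p => p.1 == k)).map Prod.snd)) := by
    rw [PySem.Dict.items_eq_map_keys _ hnodupA [], hkeysA]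
    refine List.map_congr_left (fun k _ => ?_)
    rw [PySem.Dict.getD_foldl_modify_append]
    simp [PySem.Dict.getD_empty]
  -- RHS items: a fresh-key insert loop appends
  have hB : ((PySem.Set.ofList (P.map Prod.fst)).foldl (fun d i =>
        d.insert i ((P.filter (fun p => p.1 == i)).map Prod.snd)) PySem.Dict.empty).items
      = (PySem.Set.ofList (P.map Prod.fst)).map
          (fun k => (k, (P.filter (fun p => p.1 == k)).map Prod.snd)) := by
    have := PySem.Dict.items_foldl_insert_fresh (l := PySem.Set.ofList (P.map Prod.fst))
      (k := fun i => i) (v := fun i => (P.filter (fun p => p.1 == i)).map Prod.snd)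
      (d := PySem.Dict.empty)
      (by intro a _; simp [PySem.Dict.contains_empty])
      (by simpa using PySem.Set.nodup_ofList (P.map Prod.fst))
    simpa [PySem.Dict.items] using this
  rw [hA, ← hB]; rfl
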